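-- pv_equiv track=rewrite | github.com/raagakarumanchi/proteinai | src/analysis/structure_predictor.py | _find_coil_regions
-- ===== SOURCE A (Python) =====
-- from typing import Dict, List, Tuple, Optional
--
-- def _find_coil_regions(structure: List[str]) -> List[Tuple[int, int]]:
--     """Find coil regions in secondary structure"""
--     coil_regions = []
--     start = None
--
--     for i, ss in enumerate(structure):
--         if ss == 'C':
--             if start is None:
--                 start = i
--         else:
--             if start is not None:
--                 coil_regions.append((start, i-1))
--                 start = None
--
--     if start is not None:
--         coil_regions.append((start, len(structure)-1))
--
--     return coil_regions
-- ===== SOURCE B (Python) =====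
-- from typing import Dict, List, Tuple, Optional
--
-- def _find_coil_regions(structure: List[str]) -> List[Tuple[int, int]]:
--     """Find coil regions by splitting the sequence into maximal runs of equal values."""
--     regions = []
--     i, n = 0, len(structure)
--     while i < n:
--         j = i + 1
--         while j < n and structure[j] == structure[i]:
--             j += 1
--         if structure[i] == 'C':
--             regions.append((i, j - 1))
--         i = j
--     return regions
-- ===== Notes on version B (the rewrite author's own statement) =====
-- stated objective: alternative
-- what changed: Replaced the per-element state machine (optional run start plus trailing flush) by a run-splitting scan: an inner loop finds each maximal run of equal values and C-runs are emitted directly, with no start/None state and no final flush.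
import Mathlib
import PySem

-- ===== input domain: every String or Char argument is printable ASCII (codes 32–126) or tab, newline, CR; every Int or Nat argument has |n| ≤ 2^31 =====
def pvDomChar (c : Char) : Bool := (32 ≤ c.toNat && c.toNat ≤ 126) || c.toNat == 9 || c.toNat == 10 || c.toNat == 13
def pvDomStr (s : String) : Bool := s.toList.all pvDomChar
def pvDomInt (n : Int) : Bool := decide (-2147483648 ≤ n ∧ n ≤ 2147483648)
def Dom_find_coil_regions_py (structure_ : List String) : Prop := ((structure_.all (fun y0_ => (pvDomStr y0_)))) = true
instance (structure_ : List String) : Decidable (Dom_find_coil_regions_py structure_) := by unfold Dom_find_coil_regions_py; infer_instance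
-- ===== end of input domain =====

-- B replaces A's per-element state machine (optional run start + trailing flush) by a
-- run-splitting scan emitting each maximal 'C'-run directly (objective: alternative).

-- ===== PORT A =====
-- the for-loop of A: state = (accumulated regions, optional run start), i is the enumerate counter
def pvALoop : List String → Int → List (Int × Int) → Option Int → List (Int × Int) × Option Int
  | [], _, r, st => (r, st)
  | ss :: rest, i, r, st =>
    if ss == "C" then
      match st with
      | none => pvALoop rest (i + 1) r (some i)
      | some _ => pvALoop rest (i + 1) r st
    else
      match st with
      | some s => pvALoop rest (i + 1) (r ++ [(s, i - 1)]) none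
      | none => pvALoop rest (i + 1) r none

def find_coil_regions_py (structure_ : List String) : List (Int × Int) :=
  match pvALoop structure_ 0 [] none with
  | (r, some s) => r ++ [(s, (structure_.length : Int) - 1)]
  | (r, none) => r

-- ===== PORT B =====
-- B's outer while: the inner while counting equal successors is the takeWhile length
def pvBLoop : List String → Int → List (Int × Int) → List (Int × Int)
  | [], _, r => r
  | x :: xs, i, r =>
    let k := (xs.takeWhile (fun y => y == x)).length
    let j := i + 1 + (k : Int)
    pvBLoop (xs.drop k) j (if x == "C" then r ++ [(i, j - 1)] else r)
termination_by l => l.length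
decreasing_by simp [List.length_drop]

def find_coil_regions_py_alt (structure_ : List String) : List (Int × Int) :=
  pvBLoop structure_ 0 []

-- ===== PRECONDITION & SPEC =====
def Spec_find_coil_regions_py (structure_ : List String) (out : List (Int × Int)) : Prop := out = find_coil_regions_py_alt structure_
instance (structure_ : List String) (out : List (Int × Int)) : Decidable (Spec_find_coil_regions_py structure_ out) := by unfold Spec_find_coil_regions_py; infer_instance

-- ===== CLAIM (what is proved, stated in full; the proofs are below) =====
def Claim_equal_find_coil_regions_py : Prop := ∀ (structure_ : List String), Dom_find_coil_regions_py structure_ → Spec_find_coil_regions_py structure_ (find_coil_regions_py structure_)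

-- ===== LEMMAS AND PROOFS =====

-- A's loop followed by the trailing flush, with the flush endpoint expressed relative to
-- the current offset i and remaining list l (global len - 1 = i + l.length - 1)
def pvAFin (l : List String) (i : Int) (r : List (Int × Int)) (st : Option Int) : List (Int × Int) :=
  match pvALoop l i r st with
  | (r', some s) => r' ++ [(s, i + (l.length : Int) - 1)]
  | (r', none) => r'

theorem pvAFin_spec (s : List String) :
    find_coil_regions_py s = pvAFin s 0 [] none := by
  simp [find_coil_regions_py, pvAFin]

-- a run of non-"C" elements leaves state (r, none) untouched, advancing i
theorem pvALoop_run_nonC (run : List String) (h : ∀ y ∈ run, (y == "C") = false) :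
    ∀ (rest : List String) (i : Int) (r : List (Int × Int)),
    pvALoop (run ++ rest) i r none = pvALoop rest (i + run.length) r none := by
  induction run with
  | nil => intro rest i r; simp
  | cons x xs ih =>
    intro rest i r
    have hx : (x == "C") = false := h x (List.mem_cons_self ..)
    have hxs : ∀ y ∈ xs, (y == "C") = false := fun y hy => h y (List.mem_cons_of_mem _ hy)
    simp only [List.cons_append, pvALoop, hx, Bool.false_eq_true, if_false, ih hxs]
    congr 1
    simp only [List.length_cons]
    push_cast
    ring

-- a run of "C" elements with start already set keeps it, advancing i
theorem pvALoop_run_C (run : List String) (h : ∀ y ∈ run, (y == "C") = true) :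
    ∀ (rest : List String) (i s0 : Int) (r : List (Int × Int)),
    pvALoop (run ++ rest) i r (some s0) = pvALoop rest (i + run.length) r (some s0) := by
  induction run with
  | nil => intro rest i s0 r; simp
  | cons x xs ih =>
    intro rest i s0 r
    have hx : (x == "C") = true := h x (List.mem_cons_self ..)
    have hxs : ∀ y ∈ xs, (y == "C") = true := fun y hy => h y (List.mem_cons_of_mem _ hy)
    simp only [List.cons_append, pvALoop, hx, if_true, ih hxs]
    congr 1
    simp only [List.length_cons]
    push_cast
    ring

theorem pvDropWhile_head (p : String → Bool) :
    ∀ (l : List String) (y : String) (ys : List String),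
    l.dropWhile p = y :: ys → p y = false := by
  intro l
  induction l with
  | nil => intro y ys h; simp [List.dropWhile] at h
  | cons x xs ih =>
    intro y ys h
    by_cases hp : p x
    · rw [List.dropWhile_cons_of_pos hp] at h; exact ih y ys h
    · rw [List.dropWhile_cons_of_neg hp] at h
      cases h; simpa using hp

-- the main invariant: A's loop-plus-flush from a fresh (start = None) state agrees with B's loop
theorem pvMain : ∀ (n : Nat) (l : List String), l.length ≤ n →
    ∀ (i : Int) (r : List (Int × Int)), pvAFin l i r none = pvBLoop l i r := by
  intro n
  induction n with
  | zero =>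
    intro l hl i r
    have h0 : l = [] := List.length_eq_zero_iff.mp (Nat.le_zero.mp hl)
    subst h0
    simp [pvAFin, pvALoop, pvBLoop]
  | succ n ih =>
    intro l hl i r
    cases l with
    | nil => simp [pvAFin, pvALoop, pvBLoop]
    | cons x xs =>
      have hsplit : xs.takeWhile (fun y => y == x) ++ xs.dropWhile (fun y => y == x) = xs :=
        List.takeWhile_append_dropWhile
      set tk := xs.takeWhile (fun y => y == x) with htk
      set rest := xs.dropWhile (fun y => y == x) with hrest
      have hdrop : xs.drop tk.length = rest := by
        conv_lhs => rw [← hsplit]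
        simp
      have htkmem : ∀ y ∈ tk, (y == x) = true := by
        intro y hy
        rw [htk] at hy
        exact List.mem_takeWhile_imp (p := fun z => z == x) hy
      have hlen : xs.length = tk.length + rest.length := by
        conv_lhs => rw [← hsplit]; simp
      have hxs_le : xs.length ≤ n := by
        simp only [List.length_cons] at hl; omega
      have hrestlen : rest.length ≤ n := by omega
      rw [show pvBLoop (x :: xs) i r =
            pvBLoop (xs.drop tk.length) (i + 1 + (tk.length : Int))
              (if x == "C" then r ++ [(i, i + 1 + (tk.length : Int) - 1)] else r) from by
        rw [pvBLoop]]
      rw [hdrop]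
      by_cases hx : x = "C"
      · -- C-run: A sets start := i, skips the run, then either flushes at end or on the first non-C
        subst hx
        have htkC : ∀ y ∈ tk, (y == "C") = true := fun y hy => htkmem y hy
        have hA1 : pvALoop ("C" :: xs) i r none = pvALoop rest (i + 1 + (tk.length : Int)) r (some i) := by
          conv_lhs => rw [show ("C" :: xs : List String) = "C" :: (tk ++ rest) from by rw [hsplit]]
          rw [show pvALoop ("C" :: (tk ++ rest)) i r none = pvALoop (tk ++ rest) (i + 1) r (some i) from by
            simp [pvALoop]]
          rw [pvALoop_run_C tk htkC]
        rw [if_pos (by decide : ("C" == "C") = true)]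
        set r' := r ++ [(i, i + 1 + (tk.length : Int) - 1)] with hr'
        cases hr : rest with
        | nil =>
          rw [hr] at hA1
          have hxl : xs.length = tk.length := by rw [hlen, hr]; simp
          simp only [pvAFin]
          rw [hA1]
          have hend : i + ((("C" :: xs).length : Nat) : Int) - 1 = i + 1 + (tk.length : Int) - 1 := by
            simp only [List.length_cons, hxl]
            push_cast
            ring
          simp only [pvALoop, pvBLoop, hr', hend]
        | cons y ys =>
          have hy : (y == "C") = false := by
            have := pvDropWhile_head (fun z => z == "C") xs y ys (by rw [← hrest, hr])
            simpa using this
          -- IH applied to the remaining list, one whole run later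
          have hIH := ih rest hrestlen (i + 1 + (tk.length : Int)) r'
          rw [hr] at hIH hA1
          rw [← hIH]
          -- both sides: one A-step on y (non-C, start set resp. none) then the same pvALoop tail
          have hstepA : pvALoop (y :: ys) (i + 1 + (tk.length : Int)) r (some i)
              = pvALoop ys (i + 1 + (tk.length : Int) + 1) r' none := by
            simp [pvALoop, hy, hr']
          have hstepB : pvALoop (y :: ys) (i + 1 + (tk.length : Int)) r' none
              = pvALoop ys (i + 1 + (tk.length : Int) + 1) r' none := by
            simp [pvALoop, hy]
          have hend : i + (("C" :: xs).length : Int) - 1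
              = (i + 1 + (tk.length : Int)) + ((y :: ys).length : Int) - 1 := by
            have hxl : xs.length = tk.length + (ys.length + 1) := by
              rw [hlen, hr]; simp
            simp only [List.length_cons]
            push_cast [hxl]
            ring
          simp only [pvAFin]
          rw [hA1, hstepA, hstepB, hend]
      · -- non-C run: both sides skip it with no output
        have hxb : (x == "C") = false := by simpa using hx
        have htkN : ∀ y ∈ tk, (y == "C") = false := by
          intro y hy
          have hyx : y = x := by simpa using htkmem y hy
          rw [hyx]; exact hxb
        have hA1 : pvALoop (x :: xs) i r none = pvALoop rest (i + 1 + (tk.length : Int)) r none := by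
          conv_lhs => rw [show (x :: xs : List String) = x :: (tk ++ rest) from by rw [hsplit]]
          rw [show pvALoop (x :: (tk ++ rest)) i r none = pvALoop (tk ++ rest) (i + 1) r none from by
            simp [pvALoop, hxb]]
          rw [pvALoop_run_nonC tk htkN]
        rw [if_neg (by simp [hxb])]
        have hIH := ih rest hrestlen (i + 1 + (tk.length : Int)) r
        rw [← hIH]
        simp only [pvAFin, hA1]
        have hend : i + (((x :: xs).length : Nat) : Int) - 1
            = (i + 1 + (tk.length : Int)) + (rest.length : Int) - 1 := by
          simp only [List.length_cons]
          push_cast [hlen]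
          ring
        rw [hend]

-- ===== VERDICT (by name: the statement is the Claim_ definition above) =====
theorem find_coil_regions_py_spec : Claim_equal_find_coil_regions_py := by
  intro s _
  unfold Spec_find_coil_regions_py find_coil_regions_py_alt
  rw [pvAFin_spec]
  exact pvMain s.length s (le_refl _) 0 []
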